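-- pv_equiv track=rewrite | github.com/AnhLe-Axel/Leetcode-Questions | TrappingRainWater.py | find_max_index_after
-- ===== SOURCE A (Python) =====
-- from typing import List
--
-- def find_max_index_after(start, height: List[int]) -> int:
--     index = -1
--     max = 0
--     if start < len(height):
--         for i in range(start, len(height)):
--             if height[i] > max:
--                 max = height[i]
--                 index = i
--     return index
-- ===== SOURCE B (Python) =====
-- from typing import List
--
-- def find_max_index_after(start, height: List[int]) -> int:
--     if start >= len(height):
--         return -1
--     values = [height[i] for i in range(start, len(height))]
--     m = max(values)
--     if m > 0:
--         return start + values.index(m)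
--     return -1
-- ===== Notes on version B (the rewrite author's own statement) =====
-- stated objective: idiomatic
-- what changed: Replaces A's single running-max loop with a guard plus a list-comprehension of the scanned values, max() for the peak and index() for its first occurrence, combining them arithmetically.
import Mathlib
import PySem

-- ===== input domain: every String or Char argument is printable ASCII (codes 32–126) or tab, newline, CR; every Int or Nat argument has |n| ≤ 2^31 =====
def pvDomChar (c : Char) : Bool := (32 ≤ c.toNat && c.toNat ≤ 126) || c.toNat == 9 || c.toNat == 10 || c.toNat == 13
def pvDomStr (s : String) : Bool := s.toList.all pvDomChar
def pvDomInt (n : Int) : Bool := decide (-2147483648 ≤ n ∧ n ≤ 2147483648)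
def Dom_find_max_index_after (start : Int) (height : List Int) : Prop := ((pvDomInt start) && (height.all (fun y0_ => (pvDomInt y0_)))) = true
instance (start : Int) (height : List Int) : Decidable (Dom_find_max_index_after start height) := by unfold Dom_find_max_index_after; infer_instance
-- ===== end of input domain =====

-- B replaces A's single running-max loop with a guard + comprehension of the scanned
-- values, max() for the peak and index() for its first occurrence (idiomatic decomposition).


-- ===== PORT A =====
-- literal transliteration: running pair (index, max) over range(start, len(height))
def find_max_index_after (start : Int) (height : List Int) : Int :=
  let st : Int × Int := (-1, 0)
  let st :=
    if start < (height.length : Int) then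
      (PySem.List.pyRange start (height.length : Int) 1).foldl
        (fun (st : Int × Int) i =>
          if PySem.List.pyGetD height i 0 > st.2 then (i, PySem.List.pyGetD height i 0) else st)
        st
    else st
  st.1

-- ===== PORT B =====
def find_max_index_after_alt (start : Int) (height : List Int) : Int :=
  if start ≥ (height.length : Int) then -1
  else
    let values := (PySem.List.pyRange start (height.length : Int) 1).map
      (fun i => PySem.List.pyGetD height i 0)
    match PySem.List.max? values (fun y => y) with
    | none => -1  -- unreachable: values is nonempty here (Python max would raise on [])
    | some m =>
      if m > 0 then start + (((PySem.List.index? values m).getD 0 : Nat) : Int) else -1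

-- ===== PRECONDITION & SPEC =====
-- Pre_ excludes exactly the inputs where Python A raises IndexError:
-- start < -len(height) makes range(start, len) reach indices below -len.
def Pre_find_max_index_after (start : Int) (height : List Int) : Prop :=
  -(height.length : Int) ≤ start
instance (start : Int) (height : List Int) : Decidable (Pre_find_max_index_after start height) := by unfold Pre_find_max_index_after; infer_instance
def pvWitness_find_max_index_after : Int × List Int := (1, [3, 0, 5, 5, 2])

def Spec_find_max_index_after (start : Int) (height : List Int) (out : Int) : Prop := out = find_max_index_after_alt start height
instance (start : Int) (height : List Int) (out : Int) : Decidable (Spec_find_max_index_after start height out) := by unfold Spec_find_max_index_after; infer_instance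

-- ===== CLAIM (what is proved, stated in full; the proofs are below) =====
def Claim_equal_find_max_index_after : Prop := ∀ (start : Int) (height : List Int), Dom_find_max_index_after start height → Pre_find_max_index_after start height → Spec_find_max_index_after start height (find_max_index_after start height)

-- ===== LEMMAS AND PROOFS =====

-- A's loop, rephrased over the list of scanned values with a position counter.
def loopA : List Int → Int → Int × Int → Int × Int
  | [], _, st => st
  | v :: t, s, st => loopA t (s + 1) (if v > st.2 then (s, v) else st)

theorem loopA_cons (v : Int) (t : List Int) (s : Int) (st : Int × Int) :
    loopA (v :: t) s st = loopA t (s + 1) (if v > st.2 then (s, v) else st) := rfl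

theorem le_foldl_max' (t : List Int) : ∀ b : Int, b ≤ t.foldl max b := by
  induction t with
  | nil => intro b; simp
  | cons c t ih => intro b; exact le_trans (le_max_left b c) (ih (max b c))

theorem foldl_max_mem (t : List Int) : ∀ b : Int, t.foldl max b = b ∨ t.foldl max b ∈ t := by
  induction t with
  | nil => intro b; simp
  | cons c t ih =>
    intro b
    rcases ih (max b c) with h | h
    · rcases max_cases b c with ⟨h1, _⟩ | ⟨h1, _⟩
      · left; simpa [List.foldl, h1] using h
      · right; simp [List.foldl]; left; omega
    · right; simp [List.foldl]; right; exact h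

theorem foldl_max_max (t : List Int) : ∀ a b : Int, t.foldl max (max a b) = max a (t.foldl max b) := by
  induction t with
  | nil => intro a b; simp
  | cons c t ih =>
    intro a b
    simp only [List.foldl]
    rw [max_assoc, ih]

-- Characterisation of A's loop: it ends at the first occurrence of the overall max,
-- provided that max beats the initial accumulator am.
theorem loopA_char (vs : List Int) : ∀ (s ai am : Int),
    loopA vs s (ai, am) =
      (if vs.foldl max am > am
        then (s + (((vs.idxOf? (vs.foldl max am)).getD 0 : Nat) : Int), vs.foldl max am)
        else (ai, am)) := by
  induction vs with
  | nil => intro s ai am; simp [loopA]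
  | cons v t ih =>
    intro s ai am
    rw [loopA_cons]
    by_cases hv : v > am
    · rw [if_pos hv, ih]
      have hfold : (v :: t).foldl max am = t.foldl max v := by
        simp only [List.foldl]
        rw [show max am v = v from by omega]
      by_cases ht : t.foldl max v > v
      · have hM : t.foldl max v > am := by omega
        have hne' : v ≠ t.foldl max v := by omega
        have hmem : t.foldl max v ∈ t := by
          rcases foldl_max_mem t v with h | h
          · omega
          · exact h
        rcases Option.isSome_iff_exists.mp (List.isSome_idxOf?.mpr hmem) with ⟨k, hk⟩
        have hcons : (v :: t).idxOf? (t.foldl max v) = some (k + 1) := by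
          simp [List.idxOf?_cons, hne', hk]
        rw [if_pos ht, hfold, if_pos hM, hcons, hk]
        simp only [Prod.mk.injEq, Option.getD_some]
        exact ⟨by push_cast; ring, trivial⟩
      · have hle : t.foldl max v = v := by
          have := le_foldl_max' t v; omega
        have hcons : (v :: t).idxOf? v = some 0 := by simp [List.idxOf?_cons]
        rw [if_neg ht, hfold, hle, if_pos hv, hcons]
        simp
    · rw [if_neg hv, ih]
      have hfold : (v :: t).foldl max am = t.foldl max am := by
        simp only [List.foldl]
        rw [show max am v = am from by omega]
      by_cases ht : t.foldl max am > am
      · have hne' : v ≠ t.foldl max am := by omega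
        have hmem : t.foldl max am ∈ t := by
          rcases foldl_max_mem t am with h | h
          · omega
          · exact h
        rcases Option.isSome_iff_exists.mp (List.isSome_idxOf?.mpr hmem) with ⟨k, hk⟩
        have hcons : (v :: t).idxOf? (t.foldl max am) = some (k + 1) := by
          simp [List.idxOf?_cons, hne', hk]
        rw [if_pos ht, hfold, if_pos ht, hcons, hk]
        simp only [Prod.mk.injEq, Option.getD_some]
        exact ⟨by push_cast; ring, trivial⟩
      · rw [if_neg ht, hfold, if_neg ht]

-- A's fold over the index range equals loopA over the mapped values.
theorem bridge (get : Int → Int) (b : Int) : ∀ (n : Nat) (a : Int), (b - a).toNat = n →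
    ∀ st : Int × Int,
      (PySem.List.pyRange a b 1).foldl
        (fun (st : Int × Int) i => if get i > st.2 then (i, get i) else st) st
      = loopA ((PySem.List.pyRange a b 1).map get) a st := by
  intro n
  induction n with
  | zero =>
    intro a h st
    have hba : b ≤ a := by omega
    rw [PySem.List.pyRange_one_eq_nil hba]
    simp [loopA]
  | succ n ih =>
    intro a h st
    have hab : a < b := by omega
    rw [PySem.List.pyRange_one_cons hab]
    simp only [List.foldl, List.map, loopA_cons]
    exact ih (a + 1) (by omega) _

-- ===== VERDICT (by name: the statement is the Claim_ definition above) =====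
theorem find_max_index_after_spec : Claim_equal_find_max_index_after := by
  intro start height _ _
  unfold Spec_find_max_index_after find_max_index_after find_max_index_after_alt
  by_cases hlt : start < (height.length : Int)
  · simp only [hlt, if_pos, ge_iff_le, not_le.mpr hlt]
    rw [bridge (fun i => PySem.List.pyGetD height i 0) (height.length : Int)
        ((height.length : Int) - start).toNat start rfl]
    set values := (PySem.List.pyRange start (height.length : Int) 1).map
        (fun i => PySem.List.pyGetD height i 0) with hvals
    have hne : values ≠ [] := by
      rw [hvals]
      intro h
      have := congrArg List.length h
      simp [PySem.List.length_pyRange_one] at this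
      omega
    obtain ⟨v, t, hvt⟩ := List.exists_cons_of_ne_nil hne
    rw [hvt, loopA_char, PySem.List.max?_id_cons]
    have hmm : (v :: t).foldl max 0 = max 0 (t.foldl max v) := by
      have : max 0 v = max 0 v := rfl
      simp only [List.foldl]
      rw [show max (0 : Int) v = max 0 v from rfl, foldl_max_max]
    by_cases hpos : t.foldl max v > 0
    · have h1 : (v :: t).foldl max 0 > 0 := by rw [hmm]; omega
      have h2 : (v :: t).foldl max 0 = t.foldl max v := by rw [hmm]; omega
      simp only [if_pos, hpos, h2]
      simp [PySem.List.index?_eq_idxOf?]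
    · have h2 : (v :: t).foldl max 0 = 0 := by rw [hmm]; omega
      simp [h2, hpos]
  · simp [hlt, le_of_not_gt hlt]
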